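-- pv_equiv track=rewrite | github.com/Manisha269/Test | BackendTask.py | leads
-- ===== SOURCE A (Python) =====
-- def leads(User_list):
--     Lead_list={}
--     count={}
--     for i in User_list:
--         domain_name=i[i.index('@')+1:]
--         name=i[0:i.index('@')]
--         if(domain_name not in Lead_list):
--             Lead_list[domain_name]=[]
--             Lead_list[domain_name].append(name)
--             count[domain_name]=1
--
--         else:
--             Lead_list[domain_name].append(name)
--             count[domain_name]+=1
--     return Lead_list, count
-- ===== SOURCE B (Python) =====
-- def leads(User_list):
--     pairs = [(i[i.index('@') + 1:], i[:i.index('@')]) for i in User_list]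
--     domains = list(dict.fromkeys(d for d, _ in pairs))
--     Lead_list = {d: [n for dd, n in pairs if dd == d] for d in domains}
--     count = {d: len(ns) for d, ns in Lead_list.items()}
--     return Lead_list, count
-- ===== Notes on version B (the rewrite author's own statement) =====
-- stated objective: alternative
-- what changed: B replaces A's single-pass mutable dict-of-lists-with-parallel-counter by a staged pipeline: extract all (domain, name) pairs, dedup the domains in first-occurrence order, then build each group by filtering the pair list per domain and derive counts from list lengths.
import Mathlib
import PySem

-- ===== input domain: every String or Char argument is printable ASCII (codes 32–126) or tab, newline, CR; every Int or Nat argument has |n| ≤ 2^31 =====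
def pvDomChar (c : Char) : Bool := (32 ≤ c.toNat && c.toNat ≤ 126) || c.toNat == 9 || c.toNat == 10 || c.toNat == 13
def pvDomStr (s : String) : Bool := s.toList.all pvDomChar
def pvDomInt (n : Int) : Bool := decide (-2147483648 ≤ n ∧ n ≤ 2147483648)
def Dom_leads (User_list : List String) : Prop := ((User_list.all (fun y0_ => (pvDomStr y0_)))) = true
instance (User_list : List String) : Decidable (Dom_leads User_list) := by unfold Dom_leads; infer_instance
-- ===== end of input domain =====

-- B is a staged pipeline (extract (domain,name) pairs, dedup domains, filter per domain,
-- counts from lengths) instead of A's single-pass mutable dicts. Objective: alternative.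


-- ===== PORT A =====
-- A's loop body: compute domain/name from the first '@', then either create the
-- list-and-count entries or append/increment; dict mutation d[k].append / d[k] += 1 is Dict.modify.
def leadsStepA (st : PySem.Dict String (List String) × PySem.Dict String Int) (i : String) :
    PySem.Dict String (List String) × PySem.Dict String Int :=
  let domain_name := PySem.Str.slice i (some (PySem.Str.find i "@" + 1)) none
  let name := PySem.Str.slice i (some 0) (some (PySem.Str.find i "@"))
  if st.1.contains domain_name = false then
    ((st.1.insert domain_name []).modify domain_name [] (fun l => l ++ [name]),
     st.2.insert domain_name 1)
  else
    (st.1.modify domain_name [] (fun l => l ++ [name]),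
     st.2.modify domain_name 0 (fun n => n + 1))

def leads (User_list : List String) : (List (String × List String)) × (List (String × Int)) :=
  let r := User_list.foldl leadsStepA (PySem.Dict.empty, PySem.Dict.empty)
  (r.1.items, r.2.items)

-- ===== PORT B =====
-- B: pairs list comprehension; dict.fromkeys dedup is PySem.List.dedup; group comprehension = filter+map.
def leads_alt (User_list : List String) : (List (String × List String)) × (List (String × Int)) :=
  let pairs := User_list.map (fun i =>
    (PySem.Str.slice i (some (PySem.Str.find i "@" + 1)) none,
     PySem.Str.slice i none (some (PySem.Str.find i "@"))))
  let domains := PySem.List.dedup (pairs.map (fun p => p.1))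
  let Lead_list := domains.map (fun d => (d, (pairs.filter (fun q => q.1 == d)).map (fun q => q.2)))
  let count := Lead_list.map (fun p => (p.1, (p.2.length : Int)))
  (Lead_list, count)

-- ===== PRECONDITION & SPEC =====
-- Pre_ excludes exactly the inputs where some entry has no '@': there Python A (and B) raise ValueError from str.index.
def Pre_leads (User_list : List String) : Prop :=
  (User_list.all (fun s => PySem.Str.isIn "@" s)) = true
instance (User_list : List String) : Decidable (Pre_leads User_list) := by unfold Pre_leads; infer_instance
def pvWitness_leads : List String := ["a@x.com", "b@x.com", "c@y.org"]

def Spec_leads (User_list : List String) (out : (List (String × List String)) × (List (String × Int))) : Prop := out = leads_alt User_list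
instance (User_list : List String) (out : (List (String × List String)) × (List (String × Int))) : Decidable (Spec_leads User_list out) := by unfold Spec_leads; infer_instance

-- ===== CLAIM (what is proved, stated in full; the proofs are below) =====
def Claim_equal_leads : Prop := ∀ (User_list : List String), Dom_leads User_list → Pre_leads User_list → Spec_leads User_list (leads User_list)

-- ===== LEMMAS AND PROOFS =====

-- abstraction of A's grouping (first component), used only in the proofs
def pvStep (d : PySem.Dict String (List String)) (p : String × String) :
    PySem.Dict String (List String) :=
  d.modify p.1 [] (fun l => l ++ [p.2])

def pvPairs (User_list : List String) : List (String × String) :=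
  User_list.map (fun i =>
    (PySem.Str.slice i (some (PySem.Str.find i "@" + 1)) none,
     PySem.Str.slice i none (some (PySem.Str.find i "@"))))

def pvLenMap (l : List (String × List String)) : List (String × Int) :=
  l.map (fun p => (p.1, (p.2.length : Int)))

-- i[0:k] = i[:k]
lemma pvSliceZero (s : String) (b : Int) :
    PySem.Str.slice s (some 0) (some b) = PySem.Str.slice s none (some b) := by
  simp [PySem.Str.slice]

-- A's branching step, on abstract domain/name strings: first component is the plain modify step
lemma pvFstAux (L : PySem.Dict String (List String)) (C : PySem.Dict String Int)
    (dn nm : String) :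
    (if L.contains dn = false then
        ((L.insert dn []).modify dn [] (fun l => l ++ [nm]), C.insert dn 1)
      else (L.modify dn [] (fun l => l ++ [nm]), C.modify dn 0 (fun n => n + 1))).1
      = L.modify dn [] (fun l => l ++ [nm]) := by
  split_ifs with h
  · show (L.insert dn []).insert dn _ = L.insert dn _
    rw [PySem.Dict.insert_insert_self, PySem.Dict.getD_insert_self,
        PySem.Dict.getD_of_not_contains L [] h]
  · rfl

-- A's branching step: the count side keeps the length invariant
lemma pvSndAux (L : PySem.Dict String (List String)) (C : PySem.Dict String Int)
    (dn nm : String) (hnd : L.keys.Nodup) (hinv : C.items = pvLenMap L.items) :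
    (if L.contains dn = false then
        ((L.insert dn []).modify dn [] (fun l => l ++ [nm]), C.insert dn 1)
      else (L.modify dn [] (fun l => l ++ [nm]), C.modify dn 0 (fun n => n + 1))).2.items
      = pvLenMap ((L.modify dn [] (fun l => l ++ [nm])).items) := by
  have hkeys : C.keys = L.keys := by
    simp only [PySem.Dict.keys, hinv, pvLenMap, List.map_map]
    rfl
  have hcC : C.contains dn = L.contains dn := by
    rw [PySem.Dict.contains_eq_decide_mem_keys, PySem.Dict.contains_eq_decide_mem_keys, hkeys]
  split_ifs with h
  · show (C.insert dn 1).items = pvLenMap ((L.insert dn (L.getD dn [] ++ [nm])).items)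
    rw [PySem.Dict.items_insert_of_not_contains C 1 (by rw [hcC]; exact h),
        PySem.Dict.items_insert_of_not_contains L _ h,
        PySem.Dict.getD_of_not_contains L [] h]
    simp [pvLenMap, hinv]
  · have h1 : L.contains dn = true := by revert h; cases L.contains dn <;> simp
    show (C.insert dn (C.getD dn 0 + 1)).items
        = pvLenMap ((L.insert dn (L.getD dn [] ++ [nm])).items)
    obtain ⟨v, hv⟩ : ∃ v, L.get? dn = some v := by
      have hs := PySem.Dict.contains_eq_isSome_get? (d := L) (k := dn)
      rw [h1] at hs
      exact Option.isSome_iff_exists.mp hs.symm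
    have hvmem : (dn, v) ∈ L.items := PySem.Dict.mem_items_of_get?_eq_some L hv
    have hgd1 : L.getD dn [] = v := PySem.Dict.getD_of_get?_eq_some L [] hv
    have hnd2 : C.keys.Nodup := by rw [hkeys]; exact hnd
    have hvmem2 : (dn, (v.length : Int)) ∈ C.items := by
      rw [hinv]; exact List.mem_map.mpr ⟨(dn, v), hvmem, rfl⟩
    have hgd2 : C.getD dn 0 = (v.length : Int) :=
      PySem.Dict.getD_of_mem_items C hvmem2 hnd2 0
    rw [PySem.Dict.items_insert_of_contains C _ (by rw [hcC]; exact h1),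
        PySem.Dict.items_insert_of_contains L _ h1, hinv, hgd1, hgd2]
    simp only [pvLenMap, List.map_map, List.map_inj_left]
    intro p hp
    by_cases hpk : p.1 == dn
    · simp only [Function.comp, hpk, if_pos]
      simp only [List.length_append, List.length_singleton]
      push_cast
      ring_nf
    · simp [Function.comp, hpk]

lemma stepA_fst (st : PySem.Dict String (List String) × PySem.Dict String Int) (i : String) :
    (leadsStepA st i).1 = pvStep st.1
      (PySem.Str.slice i (some (PySem.Str.find i "@" + 1)) none,
       PySem.Str.slice i none (some (PySem.Str.find i "@"))) := by
  simp only [leadsStepA, pvStep, pvSliceZero]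
  exact pvFstAux st.1 st.2 _ _

lemma stepA_snd (st : PySem.Dict String (List String) × PySem.Dict String Int) (i : String)
    (hnd : st.1.keys.Nodup) (hinv : st.2.items = pvLenMap st.1.items) :
    (leadsStepA st i).2.items = pvLenMap ((pvStep st.1
      (PySem.Str.slice i (some (PySem.Str.find i "@" + 1)) none,
       PySem.Str.slice i none (some (PySem.Str.find i "@")))).items) := by
  simp only [leadsStepA, pvStep, pvSliceZero]
  exact pvSndAux st.1 st.2 _ _ hnd hinv

lemma keys_pvStep (d : PySem.Dict String (List String)) (p : String × String)
    (h : d.keys.Nodup) : (pvStep d p).keys.Nodup := by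
  unfold pvStep
  exact PySem.Dict.nodup_keys_insert _ _ _ h

-- link A's fold to a fold of pvStep over the pair list
lemma fold_inv (xs : List String) (st : PySem.Dict String (List String) × PySem.Dict String Int)
    (hnd : st.1.keys.Nodup) (hinv : st.2.items = pvLenMap st.1.items) :
    (xs.foldl leadsStepA st).1 = (pvPairs xs).foldl pvStep st.1 ∧
      (xs.foldl leadsStepA st).2.items = pvLenMap (((pvPairs xs).foldl pvStep st.1).items) := by
  induction xs generalizing st with
  | nil => exact ⟨rfl, hinv⟩
  | cons x xs ih =>
    simp only [List.foldl_cons, pvPairs, List.map_cons]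
    have h1 := stepA_fst st x
    have h2 := stepA_snd st x hnd hinv
    have h3 := ih (leadsStepA st x) (by rw [h1]; exact keys_pvStep _ _ hnd) (by rw [h1]; exact h2)
    simp only [pvPairs] at h3
    rw [h1] at h3
    exact h3

-- the grouping fold's items are the per-domain filters over the dedup'd domains
lemma fold_items (ps : List (String × String)) :
    ((ps.foldl pvStep PySem.Dict.empty)).items
      = (PySem.List.dedup (ps.map (fun p => p.1))).map
          (fun d => (d, (ps.filter (fun q => q.1 == d)).map (fun q => q.2))) := by
  have hnd : (ps.foldl pvStep PySem.Dict.empty).keys.Nodup := by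
    unfold pvStep
    exact PySem.Dict.nodup_keys_foldl_modify_key ps (fun p => p.1) []
      (fun d p l => l ++ [p.2]) PySem.Dict.empty PySem.Dict.nodup_keys_empty
  have hkeys : (ps.foldl pvStep PySem.Dict.empty).keys
      = PySem.List.dedup (ps.map (fun p => p.1)) := by
    unfold pvStep
    rw [PySem.Dict.keys_foldl_modify_key]
    simp [PySem.Dict.keys, PySem.Dict.empty, PySem.Set.update, PySem.Set.ofList_eq_foldl]
  rw [PySem.Dict.items_eq_map_keys _ hnd [], hkeys]
  apply List.map_congr_left
  intro d _
  have hg : (ps.foldl pvStep PySem.Dict.empty).getD d []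
      = (ps.filter (fun q => q.1 == d)).map (fun q => q.2) := by
    unfold pvStep
    rw [PySem.Dict.getD_foldl_modify_append]
    simp [PySem.Dict.getD_empty]
  rw [hg]

-- ===== VERDICT (by name: the statement is the Claim_ definition above) =====
theorem leads_spec : Claim_equal_leads := by
  intro ul _ _
  unfold Spec_leads leads leads_alt
  obtain ⟨h1, h2⟩ := fold_inv ul (PySem.Dict.empty, PySem.Dict.empty)
    PySem.Dict.nodup_keys_empty rfl
  have hi := fold_items (pvPairs ul)
  simp only [pvPairs] at h1 h2 hi
  dsimp only
  rw [h1, h2, hi]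
  simp [pvLenMap, List.map_map, Function.comp]
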